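-- pv_equiv track=rewrite | github.com/KyleCommits/dnd-ai-dungeon-master-v3 | src/spell_integration.py | _get_cantrips_known
-- ===== SOURCE A (Python) =====
-- def _get_cantrips_known(class_name: str, level: int) -> int:
--     """Get number of cantrips known by class and level"""
--     cantrip_progression = {
--         "Wizard": {1: 3, 4: 4, 10: 5},
--         "Sorcerer": {1: 4, 4: 5, 10: 6},
--         "Cleric": {1: 3, 4: 4, 10: 5},
--         "Druid": {1: 2, 4: 3, 10: 4},
--         "Bard": {1: 2, 4: 3, 10: 4},
--         "Warlock": {1: 2, 4: 3, 10: 4}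
--     }
--
--     progression = cantrip_progression.get(class_name, {})
--     cantrips = 0
--     for threshold_level in sorted(progression.keys()):
--         if level >= threshold_level:
--             cantrips = progression[threshold_level]
--     return cantrips
-- ===== SOURCE B (Python) =====
-- def _get_cantrips_known(class_name: str, level: int) -> int:
--     """Get number of cantrips known by class and level"""
--     base_cantrips = {
--         "Wizard": 3,
--         "Sorcerer": 4,
--         "Cleric": 3,
--         "Druid": 2,
--         "Bard": 2,
--         "Warlock": 2,
--     }
--     if level < 1 or class_name not in base_cantrips:
--         return 0
--     # Every casting class gains one extra cantrip at level 4 and another at level 10.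
--     return base_cantrips[class_name] + (level >= 4) + (level >= 10)
-- ===== Notes on version B (the rewrite author's own statement) =====
-- stated objective: simpler
-- what changed: Replaces the per-class threshold table scanned with a sorted loop by a closed arithmetic formula: a base cantrip count per class plus one bump at level 4 and one at level 10, with no threshold table or scan at all.
import Mathlib
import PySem

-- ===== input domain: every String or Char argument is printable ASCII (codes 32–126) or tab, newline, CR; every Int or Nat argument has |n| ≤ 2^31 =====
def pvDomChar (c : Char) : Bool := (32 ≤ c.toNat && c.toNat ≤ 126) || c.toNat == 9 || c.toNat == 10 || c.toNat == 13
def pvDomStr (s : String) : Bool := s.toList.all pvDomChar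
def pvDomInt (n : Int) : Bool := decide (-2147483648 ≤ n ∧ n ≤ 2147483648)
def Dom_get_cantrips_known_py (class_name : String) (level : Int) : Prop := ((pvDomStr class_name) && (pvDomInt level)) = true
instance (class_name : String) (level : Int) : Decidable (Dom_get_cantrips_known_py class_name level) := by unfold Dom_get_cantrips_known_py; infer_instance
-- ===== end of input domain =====

-- ===== PORT A =====
-- Header: B replaces A's threshold table + sorted overwrite loop with a closed formula
-- (per-class base + a bump at levels 4 and 10); objective: simpler.
def cantripProgA : PySem.Dict String (PySem.Dict Int Int) :=
  PySem.Dict.ofList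
    [ ("Wizard",   PySem.Dict.ofList [(1,3),(4,4),(10,5)])
    , ("Sorcerer", PySem.Dict.ofList [(1,4),(4,5),(10,6)])
    , ("Cleric",   PySem.Dict.ofList [(1,3),(4,4),(10,5)])
    , ("Druid",    PySem.Dict.ofList [(1,2),(4,3),(10,4)])
    , ("Bard",     PySem.Dict.ofList [(1,2),(4,3),(10,4)])
    , ("Warlock",  PySem.Dict.ofList [(1,2),(4,3),(10,4)]) ]

def get_cantrips_known_py (class_name : String) (level : Int) : Int :=
  let progression := PySem.Dict.getD cantripProgA class_name PySem.Dict.empty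
  -- for threshold_level in sorted(progression.keys()): if level >= threshold_level: cantrips = progression[threshold_level]
  -- progression[threshold_level] cannot raise (the key comes from progression.keys()), so getD _ _ 0 is exact here
  (PySem.List.sorted progression.keys (fun x => x) false).foldl
    (fun cantrips threshold_level =>
      if level ≥ threshold_level then PySem.Dict.getD progression threshold_level 0 else cantrips) 0

-- ===== PORT B =====
def baseCantripsB : PySem.Dict String Int :=
  PySem.Dict.ofList
    [ ("Wizard", 3), ("Sorcerer", 4), ("Cleric", 3)
    , ("Druid", 2), ("Bard", 2), ("Warlock", 2) ]

def get_cantrips_known_py_alt (class_name : String) (level : Int) : Int :=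
  -- if level < 1 or class_name not in base_cantrips: return 0
  if level < 1 then 0 else
  match PySem.Dict.get? baseCantripsB class_name with
  | none => 0
  -- return base_cantrips[class_name] + (level >= 4) + (level >= 10)   (Python bools count as 0/1)
  | some base => base + (if level ≥ 4 then 1 else 0) + (if level ≥ 10 then 1 else 0)

-- ===== PRECONDITION & SPEC =====
def Spec_get_cantrips_known_py (class_name : String) (level : Int) (out : Int) : Prop := out = get_cantrips_known_py_alt class_name level
instance (class_name : String) (level : Int) (out : Int) : Decidable (Spec_get_cantrips_known_py class_name level out) := by unfold Spec_get_cantrips_known_py; infer_instance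

-- ===== CLAIM =====
def Claim_equal_get_cantrips_known_py : Prop := ∀ (class_name : String) (level : Int), Dom_get_cantrips_known_py class_name level → Spec_get_cantrips_known_py class_name level (get_cantrips_known_py class_name level)

-- ===== LEMMAS AND PROOFS =====
-- One known class: A's loop over {1:a, 4:a+1, 10:a+2} equals B's base-plus-bumps formula.
theorem pv_branch_eq (cs : String) (a : Int) (level : Int)
    (hA : PySem.Dict.getD cantripProgA cs PySem.Dict.empty = PySem.Dict.mk [(1,a),(4,a+1),(10,a+2)])
    (hB : PySem.Dict.get? baseCantripsB cs = some a) :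
    get_cantrips_known_py cs level = get_cantrips_known_py_alt cs level := by
  simp only [get_cantrips_known_py, get_cantrips_known_py_alt, hA, hB]
  norm_num [PySem.Dict.keys_mk, PySem.Dict.getD, PySem.Dict.get?_mk_cons,
    PySem.List.sorted, PySem.List.insertBy, List.foldl]
  by_cases h1 : (1:Int) ≤ level <;> by_cases h4 : (4:Int) ≤ level <;> by_cases h10 : (10:Int) ≤ level <;>
    simp [h1, h4, h10] <;> (try split_ifs) <;> omega

-- A class name outside the table: A sees the empty progression, B sees no base entry; both 0.
theorem pv_default_eq (cs : String) (level : Int)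
    (hA : PySem.Dict.getD cantripProgA cs PySem.Dict.empty = PySem.Dict.empty)
    (hB : PySem.Dict.get? baseCantripsB cs = none) :
    get_cantrips_known_py cs level = get_cantrips_known_py_alt cs level := by
  simp only [get_cantrips_known_py, get_cantrips_known_py_alt, hA, hB]
  simp [PySem.Dict.empty, PySem.Dict.keys, PySem.List.sorted]

-- ===== VERDICT =====
theorem get_cantrips_known_py_spec : Claim_equal_get_cantrips_known_py := by
  intro class_name level _
  unfold Spec_get_cantrips_known_py
  by_cases h1 : class_name = "Wizard"
  · subst h1; exact pv_branch_eq _ 3 _ (by decide) (by decide)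
  by_cases h2 : class_name = "Sorcerer"
  · subst h2; exact pv_branch_eq _ 4 _ (by decide) (by decide)
  by_cases h3 : class_name = "Cleric"
  · subst h3; exact pv_branch_eq _ 3 _ (by decide) (by decide)
  by_cases h4 : class_name = "Druid"
  · subst h4; exact pv_branch_eq _ 2 _ (by decide) (by decide)
  by_cases h5 : class_name = "Bard"
  · subst h5; exact pv_branch_eq _ 2 _ (by decide) (by decide)
  by_cases h6 : class_name = "Warlock"
  · subst h6; exact pv_branch_eq _ 2 _ (by decide) (by decide)
  have eA : cantripProgA = PySem.Dict.mk
      [ ("Wizard",   PySem.Dict.mk [(1,3),(4,4),(10,5)])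
      , ("Sorcerer", PySem.Dict.mk [(1,4),(4,5),(10,6)])
      , ("Cleric",   PySem.Dict.mk [(1,3),(4,4),(10,5)])
      , ("Druid",    PySem.Dict.mk [(1,2),(4,3),(10,4)])
      , ("Bard",     PySem.Dict.mk [(1,2),(4,3),(10,4)])
      , ("Warlock",  PySem.Dict.mk [(1,2),(4,3),(10,4)]) ] := by decide
  have eB : baseCantripsB = PySem.Dict.mk
      [("Wizard",3),("Sorcerer",4),("Cleric",3),("Druid",2),("Bard",2),("Warlock",2)] := by decide
  have hA : PySem.Dict.getD cantripProgA class_name PySem.Dict.empty = PySem.Dict.empty := by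
    simp [eA, PySem.Dict.getD, PySem.Dict.get?, beq_iff_eq,
      Ne.symm h1, Ne.symm h2, Ne.symm h3, Ne.symm h4, Ne.symm h5, Ne.symm h6]
  have hB : PySem.Dict.get? baseCantripsB class_name = none := by
    simp [eB, PySem.Dict.get?, beq_iff_eq,
      Ne.symm h1, Ne.symm h2, Ne.symm h3, Ne.symm h4, Ne.symm h5, Ne.symm h6]
  exact pv_default_eq _ _ hA hB
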